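-- pv_equiv track=rewrite | github.com/JawadKotaichh/Codeforces | CSES/Sorting and searching/Appartments.py | find_apartment_matches
-- ===== SOURCE A (Python) =====
-- def find_apartment_matches(n, m, k, ListOfPeople, ListOfApp):
--     ListOfPeople.sort()
--     ListOfApp.sort()
--
--     count = 0
--     i = 0
--     j = 0
--
--     while i < n and j < m:
--         if ListOfPeople[i] - k <= ListOfApp[j] <= ListOfPeople[i] + k:
--             count += 1
--             i += 1
--             j += 1
--         elif ListOfApp[j] < ListOfPeople[i] - k:
--             j += 1
--         else:
--             i += 1
--
--     return count
-- ===== SOURCE B (Python) =====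
-- import bisect
--
--
-- def find_apartment_matches(n, m, k, ListOfPeople, ListOfApp):
--     ListOfPeople.sort()
--     ListOfApp.sort()
--     pool = ListOfApp[:max(m, 0)]
--     count = 0
--     for p in ListOfPeople[:max(n, 0)]:
--         idx = bisect.bisect_left(pool, p - k)
--         if idx < len(pool) and pool[idx] <= p + k:
--             count += 1
--             pool.pop(idx)
--     return count
-- ===== Notes on version B (the rewrite author's own statement) =====
-- stated objective: alternative
-- what changed: Replaces A's interleaved two-pointer merge scan with a per-applicant bisect (binary search) into a sorted removable pool of apartments: each person in sorted order takes the smallest available apartment >= person-k if it is <= person+k; Pre_ excludes inputs where a positive n or m exceeds the corresponding list length, on which A in general raises IndexError (on some such inputs A still happens to return 0 before touching an out-of-range index, and B returns 0 there too); both A and B sort the two argument lists in place.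
-- outside the precondition, e.g. on find_apartment_matches(2, 1, 0, [5], [1]): A returns 0, B returns 0
import Mathlib
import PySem

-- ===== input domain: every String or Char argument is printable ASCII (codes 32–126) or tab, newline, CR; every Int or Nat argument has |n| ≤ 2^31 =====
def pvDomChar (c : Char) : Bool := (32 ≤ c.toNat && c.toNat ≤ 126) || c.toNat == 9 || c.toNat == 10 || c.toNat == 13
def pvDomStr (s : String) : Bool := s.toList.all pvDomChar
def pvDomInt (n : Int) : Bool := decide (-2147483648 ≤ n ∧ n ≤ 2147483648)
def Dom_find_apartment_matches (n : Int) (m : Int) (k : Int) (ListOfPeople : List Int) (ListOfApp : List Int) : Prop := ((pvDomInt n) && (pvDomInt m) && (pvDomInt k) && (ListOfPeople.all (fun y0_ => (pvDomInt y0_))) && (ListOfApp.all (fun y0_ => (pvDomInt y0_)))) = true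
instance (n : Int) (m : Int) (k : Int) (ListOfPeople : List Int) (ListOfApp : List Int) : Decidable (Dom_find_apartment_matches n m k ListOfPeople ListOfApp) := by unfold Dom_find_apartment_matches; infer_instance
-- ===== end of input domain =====

-- B replaces A's two-pointer merge scan by per-applicant binary search (bisect) into a removable
-- sorted pool (objective: alternative). Both A and B sort the two argument lists in place; the
-- equivalence proved here is about the return value.

-- ===== PORT A =====
-- A's while loop over indices i (people) and j (apartments), with a fuel bound that merely makes
-- the recursion total ((n-i)+(m-j) falls by one per iteration); the `| _, _ => count` arm is the
-- IndexError case, unreachable under Pre_.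
def findLoopA (fuel : Nat) (n m k : Int) (people app : List Int) (i j count : Int) : Int :=
  match fuel with
  | 0 => count
  | fuel + 1 =>
    if i < n ∧ j < m then
      match PySem.List.pyGet? people i, PySem.List.pyGet? app j with
      | some p, some a =>
        if p - k ≤ a ∧ a ≤ p + k then findLoopA fuel n m k people app (i + 1) (j + 1) (count + 1)
        else if a < p - k then findLoopA fuel n m k people app i (j + 1) count
        else findLoopA fuel n m k people app (i + 1) j count
      | _, _ => count
    else count

def find_apartment_matches (n : Int) (m : Int) (k : Int) (ListOfPeople : List Int) (ListOfApp : List Int) : Int :=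
  findLoopA (n + m).toNat n m k (PySem.List.sorted ListOfPeople (fun x => x)) (PySem.List.sorted ListOfApp (fun x => x)) 0 0 0

-- ===== PORT B =====
-- one loop iteration of B: bisect_left into the pool, then match-and-pop if within tolerance
def stepB (k : Int) (st : Int × List Int) (p : Int) : Int × List Int :=
  let idx := PySem.List.bisectLeft st.2 (p - k)
  if idx < st.2.length ∧ st.2.getD idx 0 ≤ p + k then
    match PySem.List.pop? st.2 (idx : Int) with
    | some (_, rest) => (st.1 + 1, rest)
    | none => st
  else st

def find_apartment_matches_alt (n : Int) (m : Int) (k : Int) (ListOfPeople : List Int) (ListOfApp : List Int) : Int :=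
  let people := PySem.List.sorted ListOfPeople (fun x => x)
  let app := PySem.List.sorted ListOfApp (fun x => x)
  let pool := PySem.List.slice app none (some (max m 0))
  ((PySem.List.slice people none (some (max n 0))).foldl (stepB k) (0, pool)).1

-- ===== PRECONDITION & SPEC =====
-- Pre_ excludes inputs where a positive n or m exceeds the corresponding list length: on such
-- inputs Python A in general raises IndexError (on some of them it still happens to return 0
-- by exhausting the other bound before touching an out-of-range index).
def Pre_find_apartment_matches (n : Int) (m : Int) (k : Int) (ListOfPeople : List Int) (ListOfApp : List Int) : Prop :=
  n ≤ 0 ∨ m ≤ 0 ∨ (n ≤ (ListOfPeople.length : Int) ∧ m ≤ (ListOfApp.length : Int))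
instance (n : Int) (m : Int) (k : Int) (ListOfPeople : List Int) (ListOfApp : List Int) : Decidable (Pre_find_apartment_matches n m k ListOfPeople ListOfApp) := by unfold Pre_find_apartment_matches; infer_instance

def pvWitness_find_apartment_matches : Int × Int × Int × List Int × List Int := (2, 2, 1, [3, 1], [2, 9])

def Spec_find_apartment_matches (n : Int) (m : Int) (k : Int) (ListOfPeople : List Int) (ListOfApp : List Int) (out : Int) : Prop := out = find_apartment_matches_alt n m k ListOfPeople ListOfApp
instance (n : Int) (m : Int) (k : Int) (ListOfPeople : List Int) (ListOfApp : List Int) (out : Int) : Decidable (Spec_find_apartment_matches n m k ListOfPeople ListOfApp out) := by unfold Spec_find_apartment_matches; infer_instance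

-- ===== CLAIM (what is proved, stated in full; the proofs are below) =====
def Claim_equal_find_apartment_matches : Prop := ∀ (n : Int) (m : Int) (k : Int) (ListOfPeople : List Int) (ListOfApp : List Int), Dom_find_apartment_matches n m k ListOfPeople ListOfApp → Pre_find_apartment_matches n m k ListOfPeople ListOfApp → Spec_find_apartment_matches n m k ListOfPeople ListOfApp (find_apartment_matches n m k ListOfPeople ListOfApp)

-- ===== LEMMAS AND PROOFS =====

-- ghost recursion: the common functional content of both programs (structural merge on the
-- sorted prefixes)
def mergeRec (k : Int) : List Int → List Int → Int → Int
  | p :: ps, a :: as, c =>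
    if p - k ≤ a ∧ a ≤ p + k then mergeRec k ps as (c + 1)
    else if a < p - k then mergeRec k (p :: ps) as c
    else mergeRec k ps (a :: as) c
  | _, _, c => c
termination_by ps as _ => ps.length + as.length

lemma mergeRec_nil_left (k : Int) (ys : List Int) (c : Int) : mergeRec k [] ys c = c := by
  cases ys <;> simp [mergeRec]

lemma mergeRec_nil_right (k : Int) (xs : List Int) (c : Int) : mergeRec k xs [] c = c := by
  cases xs <;> simp [mergeRec]

-- A's indexed while loop computes mergeRec on the remaining prefix suffixes
lemma bridgeA (n m k : Int) (P A : List Int) (hn : n ≤ (P.length : Int)) (hm : m ≤ (A.length : Int)) :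
    ∀ (fuel : Nat) (i j c : Int), 0 ≤ i → 0 ≤ j → ((n - i) + (m - j)).toNat ≤ fuel →
    findLoopA fuel n m k P A i j c
      = mergeRec k ((P.take n.toNat).drop i.toNat) ((A.take m.toNat).drop j.toNat) c := by
  intro fuel
  induction fuel with
  | zero =>
    intro i j c hi hj hf
    rcases (by omega : n ≤ i ∨ m ≤ j) with hni | hmj
    · have hP : (P.take n.toNat).drop i.toNat = [] := by
        apply List.drop_eq_nil_of_le
        simp only [List.length_take]; omega
      rw [findLoopA, hP, mergeRec_nil_left]
    · have hA : (A.take m.toNat).drop j.toNat = [] := by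
        apply List.drop_eq_nil_of_le
        simp only [List.length_take]; omega
      rw [findLoopA, hA, mergeRec_nil_right]
  | succ fuel ih =>
    intro i j c hi hj hf
    rw [findLoopA]
    by_cases h : i < n ∧ j < m
    · obtain ⟨h1, h2⟩ := h
      have hiP : i.toNat < P.length := by omega
      have hjA : j.toNat < A.length := by omega
      have hiT : i.toNat < (P.take n.toNat).length := by
        simp only [List.length_take]; omega
      have hjT : j.toNat < (A.take m.toNat).length := by
        simp only [List.length_take]; omega
      have hgP : PySem.List.pyGet? P i = some P[i.toNat] :=
        PySem.List.pyGet?_eq_some_getElem P hi (by omega)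
      have hgA : PySem.List.pyGet? A j = some A[j.toNat] :=
        PySem.List.pyGet?_eq_some_getElem A hj (by omega)
      have eP : (P.take n.toNat).drop i.toNat
          = P[i.toNat] :: (P.take n.toNat).drop (i.toNat + 1) := by
        rw [List.drop_eq_getElem_cons hiT, List.getElem_take]
      have eA : (A.take m.toNat).drop j.toNat
          = A[j.toNat] :: (A.take m.toNat).drop (j.toNat + 1) := by
        rw [List.drop_eq_getElem_cons hjT, List.getElem_take]
      rw [if_pos ⟨h1, h2⟩, hgP, hgA]
      dsimp only
      rw [eP, eA, mergeRec]
      have ei : (i + 1).toNat = i.toNat + 1 := by omega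
      have ej : (j + 1).toNat = j.toNat + 1 := by omega
      by_cases hb1 : P[i.toNat] - k ≤ A[j.toNat] ∧ A[j.toNat] ≤ P[i.toNat] + k
      · rw [if_pos hb1, if_pos hb1,
          ih (i + 1) (j + 1) (c + 1) (by omega) (by omega) (by omega), ei, ej]
      · rw [if_neg hb1, if_neg hb1]
        by_cases hb2 : A[j.toNat] < P[i.toNat] - k
        · rw [if_pos hb2, if_pos hb2,
            ih i (j + 1) c hi (by omega) (by omega), ej, eP]
        · rw [if_neg hb2, if_neg hb2,
            ih (i + 1) j c (by omega) hj (by omega), ei, eA]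
    · rw [if_neg h]
      rcases not_and_or.mp h with hni | hnj
      · have hP : (P.take n.toNat).drop i.toNat = [] := by
          apply List.drop_eq_nil_of_le
          simp only [List.length_take]; omega
        rw [hP, mergeRec_nil_left]
      · have hA : (A.take m.toNat).drop j.toNat = [] := by
          apply List.drop_eq_nil_of_le
          simp only [List.length_take]; omega
        rw [hA, mergeRec_nil_right]

lemma findLoopA_stop (fuel : Nat) (n m k : Int) (P A : List Int) (h : ¬(0 < n ∧ 0 < m)) :
    findLoopA fuel n m k P A 0 0 0 = 0 := by
  cases fuel with
  | zero => rfl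
  | succ fuel => rw [findLoopA, if_neg h]

-- bisect_left facts, from PySem.List.bisectLeft_spec
lemma bisect_head_ge (a x : Int) (as : List Int) (hs : (a :: as).Pairwise (· ≤ ·)) (hx : x ≤ a) :
    PySem.List.bisectLeft (a :: as) x = 0 := by
  obtain ⟨hle, hlt, _⟩ := PySem.List.bisectLeft_spec (a :: as) x hs
  by_contra hne
  have h0 : (a :: as)[0] < x := hlt 0 (by simp) (by omega)
  rw [List.getElem_cons_zero] at h0
  omega

lemma bisect_head_lt (a x : Int) (as : List Int) (hs : (a :: as).Pairwise (· ≤ ·)) (hx : a < x) :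
    PySem.List.bisectLeft (a :: as) x = PySem.List.bisectLeft as x + 1 := by
  obtain ⟨hle, hlt, hge⟩ := PySem.List.bisectLeft_spec (a :: as) x hs
  obtain ⟨hle', hlt', hge'⟩ := PySem.List.bisectLeft_spec as x (List.Pairwise.of_cons hs)
  set r := PySem.List.bisectLeft (a :: as) x with hr
  set r' := PySem.List.bisectLeft as x with hr'
  simp only [List.length_cons] at hle
  have hr1 : 1 ≤ r := by
    by_contra hc
    have h0 : x ≤ (a :: as)[0]'(by simp) := hge 0 (by simp) (by omega)
    rw [List.getElem_cons_zero] at h0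
    omega
  rcases Nat.lt_trichotomy r (r' + 1) with hlt1 | heq | hgt1
  · -- r ≤ r' : contradiction at index r - 1 of as
    have hb : r - 1 < as.length := by omega
    have h1 : as[r - 1] < x := hlt' (r - 1) hb (by omega)
    have h2 : x ≤ (a :: as)[(r - 1) + 1]'(by simp only [List.length_cons]; omega) :=
      hge ((r - 1) + 1) (by simp only [List.length_cons]; omega) (by omega)
    rw [List.getElem_cons_succ] at h2
    omega
  · exact heq
  · -- r' + 1 < r : contradiction at index r' of as
    have hb : r' < as.length := by omega
    have h1 : (a :: as)[r' + 1]'(by simp only [List.length_cons]; omega) < x :=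
      hlt (r' + 1) (by simp only [List.length_cons]; omega) (by omega)
    rw [List.getElem_cons_succ] at h1
    have h2 : x ≤ as[r'] := hge' r' hb (le_refl r')
    omega

-- B's loop leaves the count unchanged once the pool is empty
lemma fold_pool_nil (k : Int) (ps : List Int) : ∀ c : Int,
    (ps.foldl (stepB k) (c, ([] : List Int))).1 = c := by
  induction ps with
  | nil => intro c; rfl
  | cons p ps ih =>
    intro c
    have hstep : stepB k (c, ([] : List Int)) p = (c, []) := by
      simp [stepB]
    rw [List.foldl_cons, hstep, ih]

-- a pool element strictly below every remaining applicant's window is never touched by B's loop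
lemma deadHead (k a : Int) : ∀ (ps pool : List Int) (c : Int),
    (a :: pool).Pairwise (· ≤ ·) → (∀ p ∈ ps, a < p - k) →
    (ps.foldl (stepB k) (c, a :: pool)).1 = (ps.foldl (stepB k) (c, pool)).1 := by
  intro ps
  induction ps with
  | nil => intro pool c _ _; rfl
  | cons p ps ih =>
    intro pool c hs hdead
    have ha : a < p - k := hdead p List.mem_cons_self
    have hbis : PySem.List.bisectLeft (a :: pool) (p - k)
        = PySem.List.bisectLeft pool (p - k) + 1 := bisect_head_lt a (p - k) pool hs ha
    set idx := PySem.List.bisectLeft pool (p - k) with hidx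
    rw [List.foldl_cons, List.foldl_cons]
    by_cases hcond : idx < pool.length ∧ pool.getD idx 0 ≤ p + k
    · -- both steps match and pop corresponding elements
      obtain ⟨hil, hgd⟩ := hcond
      have hstep2 : stepB k (c, pool) p = (c + 1, pool.eraseIdx idx) := by
        rw [stepB]
        simp only [← hidx]
        rw [if_pos ⟨hil, hgd⟩, PySem.List.pop?_natCast pool idx hil]
      have hgd1 : (a :: pool).getD (idx + 1) 0 = pool.getD idx 0 := List.getD_cons_succ
      have hstep1 : stepB k (c, a :: pool) p = (c + 1, a :: pool.eraseIdx idx) := by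
        rw [stepB]
        simp only [hbis]
        rw [if_pos ⟨by simp only [List.length_cons]; omega, by rw [hgd1]; exact hgd⟩,
          PySem.List.pop?_natCast (a :: pool) (idx + 1)
            (by simp only [List.length_cons]; omega)]
        simp [List.eraseIdx_cons_succ]
      rw [hstep1, hstep2]
      exact ih (pool.eraseIdx idx) (c + 1)
        (List.Pairwise.sublist (List.Sublist.cons₂ a (List.eraseIdx_sublist pool idx)) hs)
        (fun q hq => hdead q (List.mem_cons_of_mem p hq))
    · -- both steps leave the state unchanged
      have hstep2 : stepB k (c, pool) p = (c, pool) := by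
        rw [stepB]; simp only [← hidx]; rw [if_neg hcond]
      have hstep1 : stepB k (c, a :: pool) p = (c, a :: pool) := by
        rw [stepB]
        simp only [hbis]
        have hgd1 : (a :: pool).getD (idx + 1) 0 = pool.getD idx 0 := List.getD_cons_succ
        rw [if_neg]
        intro ⟨hl, hg⟩
        rw [hgd1] at hg
        simp only [List.length_cons] at hl
        exact hcond ⟨by omega, hg⟩
      rw [hstep1, hstep2]
      exact ih pool c hs (fun q hq => hdead q (List.mem_cons_of_mem p hq))

-- the heart of the equivalence: B's bisect-and-pop fold computes the merge recursion
lemma foldB_eq_mergeRec (k : Int) (ps pool : List Int) (c : Int)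
    (hps : ps.Pairwise (· ≤ ·)) (hpool : pool.Pairwise (· ≤ ·)) :
    (ps.foldl (stepB k) (c, pool)).1 = mergeRec k ps pool c := by
  match ps, pool with
  | [], pool => rw [mergeRec_nil_left]; rfl
  | p :: ps, [] => rw [mergeRec_nil_right, fold_pool_nil]
  | p :: ps, a :: as =>
    rw [mergeRec, List.foldl_cons]
    by_cases h1 : p - k ≤ a ∧ a ≤ p + k
    · -- match: B pops the head
      have hbis : PySem.List.bisectLeft (a :: as) (p - k) = 0 :=
        bisect_head_ge a (p - k) as hpool h1.1
      have hstep : stepB k (c, a :: as) p = (c + 1, as) := by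
        rw [stepB]
        simp only [hbis]
        rw [if_pos ⟨by simp, by simpa using h1.2⟩,
          PySem.List.pop?_natCast (a :: as) 0 (by simp)]
        simp
      rw [if_pos h1, hstep]
      exact foldB_eq_mergeRec k ps as (c + 1) (List.Pairwise.of_cons hps)
        (List.Pairwise.of_cons hpool)
    · rw [if_neg h1]
      by_cases h2 : a < p - k
      · -- the pool head is dead: drop it on both sides
        rw [if_pos h2, ← List.foldl_cons]
        have hdead : ∀ q ∈ p :: ps, a < q - k := by
          intro q hq
          rcases List.mem_cons.mp hq with rfl | hq'
          · exact h2
          · have := (List.pairwise_cons.mp hps).1 q hq'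
            omega
        rw [deadHead k a (p :: ps) as c hpool hdead]
        exact foldB_eq_mergeRec k (p :: ps) as c hps (List.Pairwise.of_cons hpool)
      · -- the first feasible apartment is already above the window: skip this person
        rw [if_neg h2]
        have hbis : PySem.List.bisectLeft (a :: as) (p - k) = 0 :=
          bisect_head_ge a (p - k) as hpool (by omega)
        have hstep : stepB k (c, a :: as) p = (c, a :: as) := by
          rw [stepB]
          simp only [hbis]
          rw [if_neg]
          intro ⟨_, hg⟩
          simp at hg
          omega
        rw [hstep]
        exact foldB_eq_mergeRec k ps (a :: as) c (List.Pairwise.of_cons hps) hpool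
termination_by ps.length + pool.length

lemma take_pairwise (xs : List Int) (t : Nat) (h : xs.Pairwise (· ≤ ·)) :
    (xs.take t).Pairwise (· ≤ ·) :=
  List.Pairwise.sublist (List.take_sublist t xs) h

lemma sorted_id_pairwise (xs : List Int) :
    (PySem.List.sorted xs (fun x => x)).Pairwise (· ≤ ·) := by
  simpa using PySem.List.sorted_pairwise xs (fun x => x)

-- ===== VERDICT (by name: the statement is the Claim_ definition above) =====
theorem find_apartment_matches_spec : Claim_equal_find_apartment_matches := by
  intro n m k ListOfPeople ListOfApp _hdom hpre
  unfold Spec_find_apartment_matches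
  unfold find_apartment_matches find_apartment_matches_alt
  set Ps := PySem.List.sorted ListOfPeople (fun x => x) with hPs
  set As := PySem.List.sorted ListOfApp (fun x => x) with hAs
  have hlenP : Ps.length = ListOfPeople.length := by
    rw [hPs]; exact (PySem.List.sorted_perm ListOfPeople (fun x => x) false).length_eq
  have hlenA : As.length = ListOfApp.length := by
    rw [hAs]; exact (PySem.List.sorted_perm ListOfApp (fun x => x) false).length_eq
  have hsliceP : PySem.List.slice Ps none (some (max n 0)) = Ps.take (max n 0).toNat :=
    PySem.List.slice_to Ps (le_max_right n 0)
  have hsliceA : PySem.List.slice As none (some (max m 0)) = As.take (max m 0).toNat :=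
    PySem.List.slice_to As (le_max_right m 0)
  by_cases hnm : 0 < n ∧ 0 < m
  · -- active case: Pre_ gives the length bounds
    obtain ⟨hn0, hm0⟩ := hnm
    have hbounds : n ≤ (ListOfPeople.length : Int) ∧ m ≤ (ListOfApp.length : Int) := by
      rcases hpre with h | h | h
      · omega
      · omega
      · exact h
    have hA : findLoopA (n + m).toNat n m k Ps As 0 0 0
        = mergeRec k (Ps.take n.toNat) (As.take m.toNat) 0 := by
      have := bridgeA n m k Ps As (by omega) (by omega) (n + m).toNat 0 0 0
        (le_refl 0) (le_refl 0) (by omega)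
      simpa using this
    have htn : (max n 0).toNat = n.toNat := by omega
    have htm : (max m 0).toNat = m.toNat := by omega
    rw [hA]
    simp only [hsliceP, hsliceA, htn, htm]
    exact (foldB_eq_mergeRec k (Ps.take n.toNat) (As.take m.toNat) 0
      (take_pairwise Ps n.toNat (sorted_id_pairwise ListOfPeople))
      (take_pairwise As m.toNat (sorted_id_pairwise ListOfApp))).symm
  · -- degenerate case: n ≤ 0 or m ≤ 0, both sides return 0
    have hA : findLoopA (n + m).toNat n m k Ps As 0 0 0 = 0 :=
      findLoopA_stop (n + m).toNat n m k Ps As (by omega)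
    rw [hA]
    rcases not_and_or.mp hnm with hn | hm
    · have h0 : (max n 0).toNat = 0 := by omega
      simp only [hsliceP, hsliceA, h0, List.take_zero]
      rfl
    · have h0 : (max m 0).toNat = 0 := by omega
      simp only [hsliceP, hsliceA, h0, List.take_zero]
      exact (fold_pool_nil k _ 0).symm
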